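-- pv_equiv track=rewrite | github.com/IlhamIslahuddin/Codewars-Katas | The Skiponacci Sequence.py | skiponacci
-- ===== SOURCE A (Python) =====
-- def skiponacci(n):
--     arr = [1,1]
--     if n <= 1:
--         return str(n)
--     for i in range (n):
--         if i <= 1:
--             pass
--         else:
--             arr.append(arr[i-1] + arr[i-2])
--     for i in range (len(arr)):
--         if i != 0 and i % 2 != 0:
--             arr[i] = " skip "
--         else:
--             arr[i] = str(arr[i])
--
--     s = "".join(arr)
--     if s[-1] == " ":
--         s = s[:-1]
--     return s
-- ===== SOURCE B (Python) =====
-- def skiponacci(n):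
--     # One pass producing bare tokens joined by " "; no build-then-relabel-then-rstrip.
--     if n <= 1:
--         return str(n)
--     parts = []
--     a, b = 1, 1
--     for i in range(n):
--         parts.append(str(a) if i % 2 == 0 else "skip")
--         a, b = b, a + b
--     return " ".join(parts)
-- ===== Notes on version B (the rewrite author's own statement) =====
-- stated objective: simpler
-- what changed: Replaces A's three phases (build a Fibonacci array by indexing, relabel odd slots in place to ' skip ', join on '' and strip a trailing space) with a single rolling-variable loop that emits bare tokens and joins them with ' '.
import Mathlib
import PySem

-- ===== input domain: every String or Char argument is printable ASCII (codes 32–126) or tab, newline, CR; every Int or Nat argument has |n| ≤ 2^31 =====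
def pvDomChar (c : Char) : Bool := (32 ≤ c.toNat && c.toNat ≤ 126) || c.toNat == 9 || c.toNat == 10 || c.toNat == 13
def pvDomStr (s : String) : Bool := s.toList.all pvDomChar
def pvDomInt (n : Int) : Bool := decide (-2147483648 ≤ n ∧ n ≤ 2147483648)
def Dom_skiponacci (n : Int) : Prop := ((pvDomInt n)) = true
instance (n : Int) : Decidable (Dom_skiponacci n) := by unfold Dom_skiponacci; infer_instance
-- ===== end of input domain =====

-- B replaces A's build/relabel/rstrip phases with one rolling-variable loop emitting tokens joined by " "; return values proved equal.


-- ===== PORT A =====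
-- loop body of A's first for-loop: append arr[i-1] + arr[i-2] unless i <= 1
def skipFoldA (arr : List Int) (i : Int) : List Int :=
  if i ≤ 1 then arr
  else arr ++ [PySem.List.pyGetD arr (i - 1) 0 + PySem.List.pyGetD arr (i - 2) 0]

-- A's second loop assigns arr[i] from the (still unmodified) arr[i]; ported as the index map it is
def skiponacci (n : Int) : String :=
  if n ≤ 1 then PySem.Int.toStr n
  else
    let arr := (PySem.List.pyRange 0 n).foldl skipFoldA [1, 1]
    let arr2 : List String := (PySem.List.pyRange 0 (arr.length : Int)).map (fun i =>
      if i ≠ 0 ∧ PySem.Int.mod i 2 ≠ 0 then " skip "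
      else PySem.Int.toStr (PySem.List.pyGetD arr i 0))
    let s := PySem.Str.join "" arr2
    if PySem.Str.pyGet? s (-1) = some ' ' then PySem.Str.slice s none (some (-1)) else s

-- ===== PORT B =====
-- loop body of B: emit str(a) on even i, "skip" on odd i, roll (a, b) to (b, a + b)
def skipStepB (st : List String × Int × Int) (i : Int) : List String × Int × Int :=
  (st.1 ++ [if PySem.Int.mod i 2 = 0 then PySem.Int.toStr st.2.1 else "skip"], st.2.2, st.2.1 + st.2.2)

def skiponacci_alt (n : Int) : String :=
  if n ≤ 1 then PySem.Int.toStr n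
  else PySem.Str.join " " (((PySem.List.pyRange 0 n).foldl skipStepB ([], 1, 1)).1)

-- ===== PRECONDITION & SPEC =====
def Spec_skiponacci (n : Int) (out : String) : Prop := out = skiponacci_alt n
instance (n : Int) (out : String) : Decidable (Spec_skiponacci n out) := by unfold Spec_skiponacci; infer_instance

-- ===== CLAIM (what is proved, stated in full; the proofs are below) =====
def Claim_equal_skiponacci : Prop := ∀ (n : Int), Dom_skiponacci n → Spec_skiponacci n (skiponacci n)

-- ===== LEMMAS AND PROOFS =====

-- the Fibonacci values both programs enumerate
def fibF : Nat → Int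
  | 0 => 1
  | 1 => 1
  | (k + 2) => fibF (k + 1) + fibF k

lemma fibF_pos : ∀ m, 1 ≤ fibF m := by
  intro m
  induction m using Nat.strong_induction_on with
  | _ m ih =>
    match m with
    | 0 => decide
    | 1 => decide
    | (k + 2) =>
      have h1 := ih (k + 1) (by omega)
      have h2 := ih k (by omega)
      simp only [fibF]; omega

-- A-side token at index i
def tokA (i : Nat) : List Char :=
  if i % 2 = 1 then " skip ".toList else (PySem.Int.toStr (fibF i)).toList

-- B-side token at index i
def tokB (i : Nat) : List Char :=
  if i % 2 = 0 then (PySem.Int.toStr (fibF i)).toList else "skip".toList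

lemma arrA_eq : ∀ m : Nat, 2 ≤ m →
    (PySem.List.pyRange 0 (m : Int)).foldl skipFoldA [1, 1] = (List.range m).map fibF := by
  intro m hm
  induction m, hm using Nat.le_induction with
  | base => decide
  | succ m hm ih =>
    have hcast : ((m + 1 : Nat) : Int) = (m : Int) + 1 := by push_cast; ring
    rw [hcast, PySem.List.pyRange_one_succ_right (by positivity), List.foldl_append, ih]
    simp only [List.foldl_cons, List.foldl_nil, skipFoldA]
    have hnle : ¬ ((m : Int) ≤ 1) := by omega
    rw [if_neg hnle]
    have h1 : (m : Int) - 1 = ((m - 1 : Nat) : Int) := by omega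
    have h2 : (m : Int) - 2 = ((m - 2 : Nat) : Int) := by omega
    rw [h1, h2, PySem.List.pyGetD_natCast, PySem.List.pyGetD_natCast]
    have hl1 : m - 1 < m := by omega
    have hl2 : m - 2 < m := by omega
    rw [List.getD_eq_getElem?_getD, List.getD_eq_getElem?_getD]
    simp only [List.getElem?_map, List.getElem?_range, hl1, hl2]
    have hm2 : ∃ k, m = k + 2 := ⟨m - 2, by omega⟩
    obtain ⟨k, rfl⟩ := hm2
    have e1 : k + 2 - 1 = k + 1 := by omega
    have e2 : k + 2 - 2 = k := by omega
    simp only [Option.map_some, Option.getD_some, e1, e2]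
    have h3 : fibF (k + 1) + fibF k = fibF (k + 2) := rfl
    rw [h3]
    simp [List.range_succ, List.append_assoc]

lemma stB_eq : ∀ m : Nat,
    (PySem.List.pyRange 0 (m : Int)).foldl skipStepB ([], 1, 1)
      = ((List.range m).map (fun i => String.ofList (tokB i)), fibF m, fibF (m + 1)) := by
  intro m
  induction m with
  | zero => decide
  | succ m ih =>
    have hcast : ((m + 1 : Nat) : Int) = (m : Int) + 1 := by push_cast; ring
    rw [hcast, PySem.List.pyRange_one_succ_right (by positivity), List.foldl_append, ih]
    simp only [List.foldl_cons, List.foldl_nil, skipStepB, List.range_succ, List.map_append,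
      Prod.mk.injEq]
    refine ⟨?_, trivial, ?_⟩
    · simp only [List.map_cons, List.map_nil]
      congr 1
      unfold tokB
      have hmod : PySem.Int.mod (m : Int) 2 = ((m % 2 : Nat) : Int) := by
        rw [PySem.Int.mod, Int.fmod_eq_emod_of_nonneg _ (by omega)]
        push_cast
        rfl
      by_cases hp : m % 2 = 0
      · rw [hmod, if_pos (by exact_mod_cast hp), if_pos hp]
        simp [PySem.Int.toStr]
      · rw [hmod, if_neg (by exact_mod_cast hp), if_neg hp]
        decide
    · show fibF m + fibF (m + 1) = fibF (m + 1 + 1)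
      have : fibF (m + 1 + 1) = fibF (m + 1) + fibF m := rfl
      omega

lemma join_append_singleton (sep : List Char) (xs : List (List Char)) (y : List Char) (hx : xs ≠ []) :
    PySem.Chars.join sep (xs ++ [y]) = PySem.Chars.join sep xs ++ sep ++ y := by
  induction xs with
  | nil => exact absurd rfl hx
  | cons x t ih =>
    cases t with
    | nil => simp [PySem.Chars.join_cons_cons, PySem.Chars.join_singleton]
    | cons z t' =>
      simp only [List.cons_append]
      rw [PySem.Chars.join_cons_cons, PySem.Chars.join_cons_cons]
      rw [show z :: (t' ++ [y]) = (z :: t') ++ [y] from rfl, ih (by simp)]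
      simp [List.append_assoc]

lemma join_AB : ∀ m : Nat, 1 ≤ m →
    PySem.Chars.join [] ((List.range m).map tokA)
      = PySem.Chars.join [' '] ((List.range m).map tokB)
        ++ (if m % 2 = 0 then [' '] else []) := by
  intro m hm
  induction m, hm using Nat.le_induction with
  | base => simp [tokA, tokB, PySem.Chars.join_singleton]
  | succ m hm ih =>
    rw [List.range_succ, List.map_append, List.map_append, List.map_cons, List.map_cons,
      List.map_nil, List.map_nil,
      join_append_singleton _ _ _ (by simp; omega), join_append_singleton _ _ _ (by simp; omega),
      ih]
    by_cases hp : m % 2 = 0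
    · have h1 : (m + 1) % 2 = 1 := by omega
      rw [if_pos hp, if_neg (by omega)]
      have ha : tokA m = (PySem.Int.toStr (fibF m)).toList := by unfold tokA; rw [if_neg (by omega)]
      have hb : tokB m = (PySem.Int.toStr (fibF m)).toList := by unfold tokB; rw [if_pos hp]
      rw [ha, hb]
      simp [List.append_assoc]
    · have h1 : (m + 1) % 2 = 0 := by omega
      rw [if_neg hp, if_pos h1]
      have ha : tokA m = " skip ".toList := by unfold tokA; rw [if_pos (by omega)]
      have hb : tokB m = "skip".toList := by unfold tokB; rw [if_neg hp]
      rw [ha, hb]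
      have : " skip ".toList = [' '] ++ "skip".toList ++ [' '] := by decide
      rw [this]
      simp [List.append_assoc]

lemma toDigitsCore_digits : ∀ (fuel n : Nat) (acc : List Char),
    (∀ c ∈ acc, c.isDigit) → ∀ c ∈ Nat.toDigitsCore 10 fuel n acc, c.isDigit := by
  intro fuel
  induction fuel with
  | zero => intro n acc hacc; simpa [Nat.toDigitsCore] using hacc
  | succ fuel ih =>
    intro n acc hacc
    have hd : (n % 10).digitChar.isDigit = true := by
      have : n % 10 < 10 := Nat.mod_lt _ (by omega)
      interval_cases h : n % 10 <;> decide
    rw [Nat.toDigitsCore]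
    split
    · intro c hc
      rcases List.mem_cons.mp hc with rfl | hc
      · exact hd
      · exact hacc c hc
    · exact ih _ _ (fun c hc => by
        rcases List.mem_cons.mp hc with rfl | hc
        · exact hd
        · exact hacc c hc)

lemma toDigitsCore_ne_nil : ∀ (fuel n : Nat) (acc : List Char),
    acc ≠ [] ∨ fuel ≠ 0 → Nat.toDigitsCore 10 fuel n acc ≠ [] := by
  intro fuel
  induction fuel with
  | zero => intro n acc h; simp only [Nat.toDigitsCore]; tauto
  | succ fuel ih =>
    intro n acc _
    rw [Nat.toDigitsCore]
    split
    · simp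
    · exact ih _ _ (Or.inl (by simp))

lemma toChars_digits (k : Int) (hk : 1 ≤ k) :
    (PySem.Int.toChars k) ≠ [] ∧ ∀ c ∈ PySem.Int.toChars k, c.isDigit := by
  rw [PySem.Int.toChars, if_neg (by omega)]
  exact ⟨toDigitsCore_ne_nil _ _ _ (Or.inr (by omega)),
    toDigitsCore_digits _ _ _ (by simp)⟩

-- last char of the B-side join is a digit (for m ≥ 1, m odd is not even needed: last token at even index)
lemma joinB_last (m : Nat) (hm : 1 ≤ m) (hodd : m % 2 = 1) :
    ∃ c, (PySem.Chars.join [' '] ((List.range m).map tokB)).getLast? = some c ∧ c.isDigit := by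
  obtain ⟨k, rfl⟩ : ∃ k, m = k + 1 := ⟨m - 1, by omega⟩
  have hkeven : k % 2 = 0 := by omega
  have hT : tokB k = (PySem.Int.toStr (fibF k)).toList := by unfold tokB; rw [if_pos hkeven]
  have hdig := toChars_digits (fibF k) (fibF_pos k)
  have hlist : (PySem.Int.toStr (fibF k)).toList = PySem.Int.toChars (fibF k) :=
    PySem.Int.toList_toStr _
  refine ⟨(PySem.Int.toChars (fibF k)).getLast hdig.1, ?_, hdig.2 _ (List.getLast_mem _)⟩
  rcases Nat.eq_zero_or_pos k with rfl | hk
  · simp [PySem.Chars.join_singleton, hT, hlist, List.getLast?_eq_some_getLast hdig.1]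
  · rw [List.range_succ, List.map_append, List.map_cons, List.map_nil,
      join_append_singleton _ _ _ (by simp; omega), hT, hlist,
      List.append_assoc, List.getLast?_append, List.getLast?_append]
    rw [List.getLast?_eq_some_getLast hdig.1]
    simp [Option.some_or]

lemma mod_two_natCast (i : Nat) : PySem.Int.mod (i : Int) 2 = ((i % 2 : Nat) : Int) := by
  rw [PySem.Int.mod, Int.fmod_eq_emod_of_nonneg _ (by omega)]
  push_cast
  rfl

lemma digit_ne_space {c : Char} (h : c.isDigit = true) : c ≠ ' ' := by
  intro rfl_eq
  subst rfl_eq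
  exact absurd h (by decide)

-- ===== VERDICT (by name: the statement is the Claim_ definition above) =====
theorem skiponacci_spec : Claim_equal_skiponacci := by
  intro n _
  simp only [Spec_skiponacci, skiponacci, skiponacci_alt]
  by_cases hle : n ≤ 1
  · rw [if_pos hle, if_pos hle]
  · rw [if_neg hle, if_neg hle]
    have hn2 : 2 ≤ n := by omega
    obtain ⟨m, hm, rfl⟩ : ∃ m : Nat, 2 ≤ m ∧ n = (m : Int) :=
      ⟨n.toNat, by omega, by omega⟩
    rw [arrA_eq m hm, stB_eq m]
    -- the relabelled list is the A-token list
    have harr2 : (PySem.List.pyRange 0 (((List.range m).map fibF).length : Int)).map (fun i =>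
        if i ≠ 0 ∧ PySem.Int.mod i 2 ≠ 0 then " skip "
        else PySem.Int.toStr (PySem.List.pyGetD ((List.range m).map fibF) i 0))
        = (List.range m).map (fun i => String.ofList (tokA i)) := by
      rw [List.length_map, List.length_range, PySem.List.pyRange_zero_natCast, List.map_map]
      refine List.map_congr_left (fun i hi => ?_)
      have him : i < m := List.mem_range.mp hi
      simp only [Function.comp]
      rw [mod_two_natCast]
      have hget : PySem.List.pyGetD ((List.range m).map fibF) ((i : Nat) : Int) 0 = fibF i := by
        rw [PySem.List.pyGetD_natCast, List.getD_eq_getElem?_getD]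
        simp [him]
      by_cases hp : i % 2 = 1
      · rw [if_pos ⟨by exact_mod_cast (by omega : i ≠ 0), by exact_mod_cast (by omega : i % 2 ≠ 0)⟩]
        unfold tokA
        rw [if_pos hp]
        decide
      · rw [if_neg (by push_cast; omega), hget]
        unfold tokA
        rw [if_neg hp, String.ofList_toList]
    rw [harr2]
    -- compare through the character lists
    rw [← String.toList_inj]
    have hJB : (PySem.Str.join " " ((List.range m).map (fun i => String.ofList (tokB i)))).toList
        = PySem.Chars.join [' '] ((List.range m).map tokB) := by
      rw [PySem.Str.toList_join, List.map_map]
      congr 1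
      refine List.map_congr_left (fun i _ => ?_)
      simp [Function.comp, String.toList_ofList]
    have hs : (PySem.Str.join "" ((List.range m).map (fun i => String.ofList (tokA i)))).toList
        = PySem.Chars.join [' '] ((List.range m).map tokB)
          ++ (if m % 2 = 0 then [' '] else []) := by
      rw [PySem.Str.toList_join, List.map_map]
      have : (List.map (String.toList ∘ fun i => String.ofList (tokA i)) (List.range m))
          = (List.range m).map tokA := by
        refine List.map_congr_left (fun i _ => ?_)
        simp [Function.comp, String.toList_ofList]
      rw [show ("" : String).toList = ([] : List Char) from rfl, this, join_AB m (by omega)]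
    by_cases hpar : m % 2 = 0
    · rw [if_pos hpar] at hs
      have hlast : PySem.Str.pyGet?
          (PySem.Str.join "" ((List.range m).map (fun i => String.ofList (tokA i)))) (-1) = some ' ' := by
        rw [PySem.Str.pyGet?, PySem.Chars.pyGet?_eq_listPyGet?, PySem.List.pyGet?_neg_one, hs]
        simp [List.getLast?_append]
      rw [if_pos hlast, PySem.Str.slice_to_neg_one, hs, hJB, List.dropLast_concat]
    · rw [if_neg hpar] at hs
      obtain ⟨c, hc, hcd⟩ := joinB_last m (by omega) (by omega)
      have hlast : PySem.Str.pyGet?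
          (PySem.Str.join "" ((List.range m).map (fun i => String.ofList (tokA i)))) (-1) = some c := by
        rw [PySem.Str.pyGet?, PySem.Chars.pyGet?_eq_listPyGet?, PySem.List.pyGet?_neg_one, hs,
          List.append_nil, hc]
      rw [if_neg (by rw [hlast]; exact fun h => digit_ne_space hcd (Option.some.inj h)), hs, hJB,
        List.append_nil]
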